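-- pv_equiv track=rewrite | github.com/intelogroup/mee-app | backend/app/core/guardrails.py | clean_slang_excess
-- ===== SOURCE A (Python) =====
-- def clean_slang_excess(text: str) -> str:
--     # Rule: Max one slang term per message (surgical strike)
--     SLANG = ["!bam", "Shish!", "Ho man!", "gosh", "Bro", "man"]
--     found_count = 0
--     words = text.split()
--     cleaned_words = []
--
--     for word in words:
--         if any(s.lower() == word.lower().strip(",.!?") for s in SLANG):
--             found_count += 1
--             if found_count > 1:
--                 continue # Skip extra slang
--         cleaned_words.append(word)
--
--     return " ".join(cleaned_words)
-- ===== SOURCE B (Python) =====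
-- def clean_slang_excess(text: str) -> str:
--     # Precompute the index of the first slang word, then filter in one comprehension.
--     SLANG = ["!bam", "Shish!", "Ho man!", "gosh", "Bro", "man"]
--     slang_lower = [s.lower() for s in SLANG]
--
--     def is_slang(word):
--         return word.lower().strip(",.!?") in slang_lower
--
--     words = text.split()
--     first = next((i for i, w in enumerate(words) if is_slang(w)), None)
--     return " ".join(w for i, w in enumerate(words) if not is_slang(w) or first == i)
-- ===== Notes on version B (the rewrite author's own statement) =====
-- stated objective: simpler
-- what changed: Replaces the mutable found-count accumulator loop with a declarative decomposition: a slang predicate, a next()-over-enumerate scan for the first slang index, and a single filtering comprehension keeping non-slang words and that one index.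
import Mathlib
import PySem

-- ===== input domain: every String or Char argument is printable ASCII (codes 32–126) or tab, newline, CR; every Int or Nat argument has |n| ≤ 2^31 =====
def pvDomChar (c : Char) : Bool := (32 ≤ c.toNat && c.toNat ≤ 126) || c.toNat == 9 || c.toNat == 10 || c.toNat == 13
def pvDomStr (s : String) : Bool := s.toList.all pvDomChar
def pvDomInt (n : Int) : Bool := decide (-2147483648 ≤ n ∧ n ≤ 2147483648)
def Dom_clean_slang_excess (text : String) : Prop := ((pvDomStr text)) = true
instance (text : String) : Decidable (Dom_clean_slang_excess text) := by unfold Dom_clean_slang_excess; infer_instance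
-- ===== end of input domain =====

-- B replaces A's mutable found-count loop with a first-slang-index scan plus one filtering pass (objective: simpler).

-- ===== PORT A =====
def pvSlangA : List String := ["!bam", "Shish!", "Ho man!", "gosh", "Bro", "man"]

-- the for-loop over words, carrying found_count and emitting cleaned_words
def pvGoA : List String → Int → List String
  | [], _ => []
  | w :: ws, cnt =>
    if pvSlangA.any (fun s => PySem.Str.lower s == PySem.Str.stripChars (PySem.Str.lower w) ",.!?") then
      if cnt + 1 > 1 then pvGoA ws (cnt + 1)
      else w :: pvGoA ws (cnt + 1)
    else w :: pvGoA ws cnt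

def clean_slang_excess (text : String) : String :=
  PySem.Str.join " " (pvGoA (PySem.Str.split₀ text) 0)

-- ===== PORT B =====
def pvSlangLowerB : List String :=
  (["!bam", "Shish!", "Ho man!", "gosh", "Bro", "man"] : List String).map PySem.Str.lower

def pvIsSlangB (word : String) : Bool :=
  pvSlangLowerB.contains (PySem.Str.stripChars (PySem.Str.lower word) ",.!?")

def clean_slang_excess_alt (text : String) : String :=
  let words := PySem.Str.split₀ text
  let first : Option Int :=
    ((PySem.List.enumerate words).find? (fun p => pvIsSlangB p.2)).map (·.1)
  PySem.Str.join " "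
    (((PySem.List.enumerate words).filter (fun p => !pvIsSlangB p.2 || first == some p.1)).map (·.2))

-- ===== PRECONDITION & SPEC =====
def Spec_clean_slang_excess (text : String) (out : String) : Prop := out = clean_slang_excess_alt text
instance (text : String) (out : String) : Decidable (Spec_clean_slang_excess text out) := by unfold Spec_clean_slang_excess; infer_instance

-- ===== CLAIM (what is proved, stated in full; the proofs are below) =====
def Claim_equal_clean_slang_excess : Prop := ∀ (text : String), Dom_clean_slang_excess text → Spec_clean_slang_excess text (clean_slang_excess text)

-- ===== LEMMAS AND PROOFS =====

-- A's inline any(...) test computes exactly B's predicate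
theorem pvPredA_eq (w : String) :
    pvSlangA.any (fun s => PySem.Str.lower s == PySem.Str.stripChars (PySem.Str.lower w) ",.!?")
      = pvIsSlangB w := by
  simp [pvSlangA, pvIsSlangB, pvSlangLowerB, eq_comm, beq_eq_decide]

-- once found_count ≥ 1, A's loop is a plain filter on non-slang words
theorem pvGoA_pos (ws : List String) (cnt : Int) (h : 1 ≤ cnt) :
    pvGoA ws cnt = ws.filter (fun w => !pvIsSlangB w) := by
  induction ws generalizing cnt with
  | nil => rfl
  | cons w ws ih =>
    rw [pvGoA, pvPredA_eq]
    by_cases hs : pvIsSlangB w = true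
    · rw [if_pos hs, if_pos (by omega), ih _ (by omega)]
      simp [hs]
    · rw [if_neg hs, ih _ h]
      simp [hs]

theorem pvMapSnd_filter_enumerate (q : String → Bool) (ws : List String) (s : Int) :
    (((PySem.List.enumerate ws s).filter (fun p => q p.2)).map (·.2)) = ws.filter q := by
  induction ws generalizing s with
  | nil => simp [PySem.List.enumerate_nil]
  | cons w ws ih =>
    rw [PySem.List.enumerate_cons]
    by_cases hq : q w = true
    · simp [hq, ih]
    · simp [hq, ih]

theorem pvFst_ge_of_mem_enumerate {p : Int × String} {ws : List String} {s : Int}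
    (h : p ∈ PySem.List.enumerate ws s) : s ≤ p.1 := by
  rcases (PySem.List.mem_enumerate_iff _ _ _).1 h with ⟨k, hk, rfl⟩
  omega

-- main invariant: B's filter-by-first-index form equals A's loop (started at count 0)
theorem pvMain (ws : List String) (s : Int) :
    (((PySem.List.enumerate ws s).filter
        (fun p => !pvIsSlangB p.2 ||
          ((PySem.List.enumerate ws s).find? (fun p => pvIsSlangB p.2)).map (·.1) == some p.1)).map (·.2))
      = pvGoA ws 0 := by
  induction ws generalizing s with
  | nil => rfl
  | cons w ws ih =>
    rw [PySem.List.enumerate_cons, pvGoA, pvPredA_eq]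
    by_cases hs : pvIsSlangB w = true
    · rw [if_pos hs, if_neg (by omega)]
      rw [List.find?_cons_of_pos (by simpa using hs)]
      rw [List.filter_cons_of_pos (by simp)]
      rw [List.filter_congr (l := PySem.List.enumerate ws (s + 1))
            (q := fun p => !pvIsSlangB p.2) ?_]
      · rw [List.map_cons, pvMapSnd_filter_enumerate (fun x => !pvIsSlangB x), pvGoA_pos ws (0+1) (by omega)]
      · intro p hp
        have := pvFst_ge_of_mem_enumerate hp
        have hne : (s == p.1) = false := by simp; omega
        simp [hne]
    · rw [if_neg hs]
      rw [List.find?_cons_of_neg (by simpa using hs)]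
      rw [List.filter_cons_of_pos (by simp [hs])]
      rw [List.map_cons, ih (s + 1)]

-- ===== VERDICT (by name: the statement is the Claim_ definition above) =====
theorem clean_slang_excess_spec : Claim_equal_clean_slang_excess := by
  intro text _
  unfold Spec_clean_slang_excess clean_slang_excess clean_slang_excess_alt
  exact congrArg (PySem.Str.join " ") (pvMain (PySem.Str.split₀ text) 0).symm
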